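-- pv_equiv track=rewrite | github.com/SaySoGooD/backend-test | task_5/main.py | solution
-- ===== SOURCE A (Python) =====
-- from typing import Tuple
--
-- def solution(nums: list) -> Tuple:
--     """
--     Возвращает количество уникальных чисел, второе по величине число и список чисел, делящихся на 3.
--
--     Args:
--         nums (list): Список чисел.
--
--     Returns:
--         tuple: (количество уникальных чисел, второе по величине число, список чисел, делящихся на 3)
--     """
--     # Параметры по Big O
--     # Скорость функции: O(n)
--     # Затраты по оперативной памяти: O(n)
--     unique_nums = set()
--     max_num = None
--     second_max = None
--     divisible_by_3 = []
--     for num in nums: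
--         unique_nums.add(num)
--
--         # Ищем максимальное число, для нахождения предмаксимального
--         if max_num is None or num > max_num:
--             second_max = max_num
--             max_num = num
--
--         # Ищем предпоследнее по величине число
--         elif (second_max is None or num > second_max) and num != max_num:
--             second_max = num
--
--         # Собираем числа которые делятся на 3
--         if num % 3 == 0:
--             divisible_by_3.append(num)
--
--     return len(unique_nums), second_max, divisible_by_3
-- ===== SOURCE B (Python) =====
-- def solution(nums: list):
--     """Same three outputs, computed separately: set for uniques, comprehension
--     for the multiples of 3, and the second-largest distinct value via sorting
--     the deduplicated values."""
--     unique = set(nums)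
--     divisible_by_3 = [n for n in nums if n % 3 == 0]
--     second_max = sorted(unique)[-2] if len(unique) >= 2 else None
--     return len(unique), second_max, divisible_by_3
-- ===== Notes on version B (the rewrite author's own statement) =====
-- stated objective: simpler
-- what changed: Replaces A's single fused loop with online top-two tracking by three independent computations: a set for the unique count, a list comprehension for the multiples of 3, and a sort of the distinct values to read off the second maximum.
import Mathlib
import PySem

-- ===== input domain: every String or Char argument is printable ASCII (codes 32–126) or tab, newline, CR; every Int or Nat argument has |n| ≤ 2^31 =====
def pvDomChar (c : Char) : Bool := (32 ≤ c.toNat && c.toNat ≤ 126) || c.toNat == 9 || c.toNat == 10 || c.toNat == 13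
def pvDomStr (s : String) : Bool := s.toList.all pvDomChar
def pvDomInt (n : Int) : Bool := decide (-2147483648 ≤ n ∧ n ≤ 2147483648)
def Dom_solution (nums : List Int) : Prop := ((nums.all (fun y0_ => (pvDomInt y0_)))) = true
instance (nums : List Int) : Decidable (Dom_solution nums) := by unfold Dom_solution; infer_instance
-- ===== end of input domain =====

-- B computes the three outputs separately (set, comprehension, sort of the distinct
-- values for the second maximum) instead of A's fused loop with online top-two tracking;
-- objective: simpler.

-- ===== PORT A =====
-- one iteration of A's loop body over the state (unique_nums, max_num, second_max, divisible_by_3)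
def solutionStep (st : PySem.Set Int × Option Int × Option Int × List Int) (num : Int) :
    PySem.Set Int × Option Int × Option Int × List Int :=
  let u := PySem.Set.add st.1 num
  let ms : Option Int × Option Int :=
    match st.2.1, st.2.2.1 with
    | none, s => (some num, s)              -- max_num is None: second_max := max_num; max_num := num
    | some m, s =>
      if m < num then (some num, some m)    -- num > max_num
      else if ((match s with | none => true | some sv => decide (sv < num))
               && !(num == m)) then (some m, some num)
      else (some m, s)
  let d3 := if PySem.Int.mod num 3 == 0 then st.2.2.2 ++ [num] else st.2.2.2
  (u, ms.1, ms.2, d3)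

def solution (nums : List Int) : Int × Option Int × List Int :=
  let st := nums.foldl solutionStep (PySem.Set.empty, none, none, [])
  ((st.1.length : Int), st.2.2.1, st.2.2.2)

-- ===== PORT B =====
def solution_alt (nums : List Int) : Int × Option Int × List Int :=
  let unique := PySem.Set.ofList nums
  let divisibleBy3 := nums.filter (fun n => PySem.Int.mod n 3 == 0)
  let secondMax : Option Int :=
    if 2 ≤ unique.length then
      PySem.List.pyGet? (PySem.List.sorted unique (fun x => x) false) (-2)
    else none
  ((unique.length : Int), secondMax, divisibleBy3)

-- ===== PRECONDITION & SPEC =====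
def Spec_solution (nums : List Int) (out : Int × Option Int × List Int) : Prop := out = solution_alt nums
instance (nums : List Int) (out : Int × Option Int × List Int) : Decidable (Spec_solution nums out) := by unfold Spec_solution; infer_instance

-- ===== CLAIM (what is proved, stated in full; the proofs are below) =====
def Claim_equal_solution : Prop := ∀ (nums : List Int), Dom_solution nums → Spec_solution nums (solution nums)

-- ===== LEMMAS AND PROOFS =====

-- the maximum of a list, as A's loop computes it (none for the empty list)
def mspec : List Int → Option Int
  | [] => none
  | x :: t => some (t.foldl max x)

-- the largest value strictly below the maximum (A's second_max)
def sspec (p : List Int) : Option Int :=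
  match mspec p with
  | none => none
  | some M => mspec (p.filter (fun y => decide (y < M)))

theorem mspec_eq_none_iff (p : List Int) : mspec p = none ↔ p = [] := by
  cases p <;> simp [mspec]

theorem mspec_le {p : List Int} {M : Int} (h : mspec p = some M) : ∀ y ∈ p, y ≤ M := by
  cases p with
  | nil => simp [mspec] at h
  | cons x t =>
    simp only [mspec, Option.some.injEq] at h
    subst h
    intro y hy
    rcases List.mem_cons.mp hy with rfl | hyt
    · exact (PySem.List.le_foldl_max t y).1
    · exact (PySem.List.le_foldl_max t x).2 y hyt

theorem mspec_mem {p : List Int} {M : Int} (h : mspec p = some M) : M ∈ p := by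
  cases p with
  | nil => simp [mspec] at h
  | cons x t =>
    simp only [mspec, Option.some.injEq] at h
    subst h
    rcases PySem.List.foldl_max_mem t x with h1 | h1
    · rw [h1]; exact List.mem_cons_self
    · exact List.mem_cons_of_mem _ h1

theorem mspec_eq_some_of {p : List Int} {v : Int} (hv : v ∈ p) (hub : ∀ y ∈ p, y ≤ v) :
    mspec p = some v := by
  cases hm : mspec p with
  | none => rw [mspec_eq_none_iff] at hm; subst hm; simp at hv
  | some M =>
    have h1 : M ≤ v := hub M (mspec_mem hm)
    have h2 : v ≤ M := mspec_le hm v hv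
    rw [le_antisymm h1 h2]

theorem mspec_append_singleton (p : List Int) (x : Int) :
    mspec (p ++ [x]) = some (match mspec p with | none => x | some m => max m x) := by
  cases p with
  | nil => simp [mspec]
  | cons y t => simp [mspec, List.foldl_append]

theorem ofList_append_singleton (p : List Int) (x : Int) :
    PySem.Set.ofList (p ++ [x]) = PySem.Set.add (PySem.Set.ofList p) x := by
  simp [PySem.Set.ofList_eq_foldl, List.foldl_append]

theorem filter_append_singleton {α : Type} (f : α → Bool) (p : List α) (x : α) :
    (p ++ [x]).filter f = if f x then p.filter f ++ [x] else p.filter f := by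
  by_cases h : f x <;> simp [List.filter_append, h]

-- A's loop body takes the invariant state for p to the invariant state for p ++ [x]
theorem step_eq (p : List Int) (x : Int) :
    solutionStep (PySem.Set.ofList p, mspec p, sspec p,
        p.filter (fun n => PySem.Int.mod n 3 == 0)) x
      = (PySem.Set.ofList (p ++ [x]), mspec (p ++ [x]), sspec (p ++ [x]),
        (p ++ [x]).filter (fun n => PySem.Int.mod n 3 == 0)) := by
  rw [ofList_append_singleton,
    filter_append_singleton (fun n => PySem.Int.mod n 3 == 0) p x]
  cases hm : mspec p with
  | none =>
    have hp : p = [] := (mspec_eq_none_iff p).mp hm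
    subst hp
    simp [solutionStep, sspec, mspec]
  | some M =>
    have hub := mspec_le hm
    by_cases hlt : M < x
    · -- new maximum
      have hmax : max M x = x := by omega
      have hfilt : p.filter (fun y => decide (y < x)) = p :=
        List.filter_eq_self.mpr (fun y hy => by
          have := hub y hy; simp; omega)
      have hs2 : sspec (p ++ [x]) = some M := by
        simp only [sspec, mspec_append_singleton, hm, hmax]
        rw [List.filter_append]
        simp only [List.filter_cons, List.filter_nil]
        rw [show (decide (x < x)) = false by simp, if_neg (by simp)]
        simpa [hfilt] using hm
      rw [mspec_append_singleton, hm, hs2]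
      simp [solutionStep, hlt, hmax]
    · have hmax : max M x = M := by omega
      have hfa : (p ++ [x]).filter (fun y => decide (y < M))
          = p.filter (fun y => decide (y < M)) ++ (if x < M then [x] else []) := by
        by_cases hxM : x < M <;> simp [List.filter_append, hxM]
      by_cases heq : x = M
      · -- num == max_num: nothing changes
        have hs2 : sspec (p ++ [x]) = sspec p := by
          simp only [sspec, mspec_append_singleton, hm, hmax, hfa]
          rw [if_neg (by omega)]
          simp
        rw [mspec_append_singleton, hm, hs2]
        cases hsp : sspec p with
        | none => simp [solutionStep, heq]
        | some S => simp [solutionStep, heq]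
      · -- x < M strictly
        have hxM : x < M := by omega
        have hs2 : sspec (p ++ [x])
            = some (match sspec p with | none => x | some s => max s x) := by
          simp only [sspec, mspec_append_singleton, hm, hmax, hfa, if_pos hxM]
        rw [mspec_append_singleton, hm, hs2]
        cases hsp : sspec p with
        | none => simp [solutionStep, hlt, hmax, heq]
        | some S =>
          by_cases hSx : S < x
          · have hmx : max S x = x := by omega
            simp [solutionStep, hlt, hmax, heq, hSx, hmx]
          · have hmx : max S x = S := by omega
            simp [solutionStep, hlt, hmax, hSx, hmx]

theorem fold_inv (xs : List Int) : ∀ (p : List Int),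
    xs.foldl solutionStep (PySem.Set.ofList p, mspec p, sspec p,
        p.filter (fun n => PySem.Int.mod n 3 == 0))
      = (PySem.Set.ofList (p ++ xs), mspec (p ++ xs), sspec (p ++ xs),
        (p ++ xs).filter (fun n => PySem.Int.mod n 3 == 0)) := by
  induction xs with
  | nil => intro p; simp
  | cons x t ih =>
    intro p
    rw [List.foldl_cons, step_eq, ih (p ++ [x])]
    simp

theorem solution_char (nums : List Int) :
    solution nums = (((PySem.Set.ofList nums).length : Int), sspec nums,
      nums.filter (fun n => PySem.Int.mod n 3 == 0)) := by
  have h0 : ((PySem.Set.empty : PySem.Set Int), (none : Option Int), (none : Option Int),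
      ([] : List Int))
      = (PySem.Set.ofList ([] : List Int), mspec [], sspec [],
        ([] : List Int).filter (fun n => PySem.Int.mod n 3 == 0)) := rfl
  have h := fold_inv nums []
  simp only [List.nil_append] at h
  simp only [solution]
  rw [h0, h]

-- B's sorted-distinct [-2] is exactly sspec
theorem second_eq (nums : List Int) :
    (if 2 ≤ (PySem.Set.ofList nums).length then
        PySem.List.pyGet? (PySem.List.sorted (PySem.Set.ofList nums) (fun x => x) false) (-2)
      else none) = sspec nums := by
  set u := PySem.Set.ofList nums with hu
  set s := PySem.List.sorted u (fun x => x) false with hs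
  have hperm : s.Perm u := PySem.List.sorted_perm u (fun x => x) false
  have hlen : s.length = u.length := hperm.length_eq
  have hmemsu : ∀ y : Int, y ∈ s ↔ y ∈ nums := by
    intro y
    rw [PySem.List.mem_sorted, hu, PySem.Set.mem_ofList]
  by_cases h2 : 2 ≤ u.length
  · rw [if_pos h2]
    have hslen : 2 ≤ s.length := hlen ▸ h2
    have hpw : s.Pairwise (· < ·) := by
      rw [hs, hu]; exact PySem.List.sorted_ofList_pairwise_lt nums
    have hpwget := List.pairwise_iff_getElem.mp hpw
    have hne : nums ≠ [] := by
      intro hnil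
      rw [hnil] at hu
      rw [hu] at h2
      simp [PySem.Set.ofList] at h2
    cases hm : mspec nums with
    | none => exact absurd ((mspec_eq_none_iff nums).mp hm) hne
    | some M =>
      have hub := mspec_le hm
      have hlast : s[s.length - 1]'(by omega) = M := by
        have ha : s[s.length - 1]'(by omega) ≤ M :=
          hub _ ((hmemsu _).mp (s.getElem_mem _))
        have hb : M ≤ s[s.length - 1]'(by omega) := by
          obtain ⟨i, hi, hMi⟩ := List.getElem_of_mem ((hmemsu M).mpr (mspec_mem hm))
          rcases Nat.lt_or_ge i (s.length - 1) with hilt | hige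
          · rw [← hMi]; exact le_of_lt (hpwget i (s.length - 1) (by omega) (by omega) hilt)
          · have hieq : i = s.length - 1 := by omega
            subst hieq
            rw [← hMi]
        omega
      have hmid : s[s.length - 2]'(by omega) < M := by
        rw [← hlast]; exact hpwget _ _ (by omega) (by omega) (by omega)
      rw [PySem.List.pyGet?_neg_ofNat s 2 (by omega) hslen]
      rw [List.getElem?_eq_getElem (by omega)]
      have hv : mspec (nums.filter (fun y => decide (y < M)))
          = some (s[s.length - 2]'(by omega)) := by
        apply mspec_eq_some_of
        · rw [List.mem_filter]
          exact ⟨(hmemsu _).mp (s.getElem_mem _), by simpa using hmid⟩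
        · intro y hy
          rw [List.mem_filter] at hy
          obtain ⟨hyn, hyM⟩ := hy
          simp only [decide_eq_true_eq] at hyM
          obtain ⟨i, hi, hyi⟩ := List.getElem_of_mem ((hmemsu y).mpr hyn)
          have hine : i ≠ s.length - 1 := by
            intro hieq
            subst hieq
            rw [hlast] at hyi
            omega
          rcases Nat.lt_or_ge i (s.length - 2) with hilt | hige
          · rw [← hyi]; exact le_of_lt (hpwget i (s.length - 2) (by omega) (by omega) hilt)
          · have hieq : i = s.length - 2 := by omega
            subst hieq
            rw [← hyi]
      simp [sspec, hm, hv]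
  · rw [if_neg h2]
    cases hm : mspec nums with
    | none => rw [sspec, hm]
    | some M =>
      have hMu : M ∈ u := by rw [hu, PySem.Set.mem_ofList]; exact mspec_mem hm
      have hupos : 0 < u.length := List.length_pos_of_mem hMu
      have hu1 : u.length = 1 := by omega
      have hall : ∀ y ∈ nums, y = M := by
        intro y hy
        have hyu : y ∈ u := by rw [hu, PySem.Set.mem_ofList]; exact hy
        cases hcu : u with
        | nil => rw [hcu] at hyu; simp at hyu
        | cons a t =>
          have ht : t = [] := by
            rw [hcu] at hu1; simp at hu1; exact hu1
          rw [hcu, ht] at hyu hMu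
          simp at hyu hMu
          omega
      have hfilt : nums.filter (fun y => decide (y < M)) = [] := by
        apply List.filter_eq_nil_iff.mpr
        intro y hy
        have := hall y hy
        simp [this]
      have h3 : sspec nums = mspec (nums.filter (fun y => decide (y < M))) := by
        simp [sspec, hm]
      rw [h3, hfilt]
      simp [mspec]

-- ===== VERDICT (by name: the statement is the Claim_ definition above) =====
theorem solution_spec : Claim_equal_solution := by
  intro nums _
  unfold Spec_solution
  rw [solution_char]
  simp only [solution_alt]
  rw [← second_eq nums]
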